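-- pv_equiv track=rewrite | github.com/Cztk5380/msmodeling | tensor_cast/transformers/utils.py | strip_module_name
-- ===== SOURCE A (Python) =====
-- def strip_module_name(name: str) -> str:
--     """Strip `_inner` module name from the given module path name"""
--     stripped = name.removeprefix("_inner.")
--     stripped_before = name
--     while stripped != stripped_before:
--         stripped_before = stripped
--         stripped = stripped_before.removeprefix("_inner.")
--     stripped = stripped.replace("._inner.", ".")
--     stripped_before = stripped
--     stripped = stripped_before.removesuffix("._inner")
--     while stripped != stripped_before:
--         stripped_before = stripped
--         stripped = stripped_before.removesuffix("._inner")
--     return stripped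
-- ===== SOURCE B (Python) =====
-- def strip_module_name(name: str) -> str:
--     """Strip `_inner` module name from the given module path name"""
--     i = 0
--     while name.startswith("_inner.", i):
--         i += 7
--     s = name[i:].replace("._inner.", ".")
--     j = len(s)
--     while s.endswith("._inner", 0, j):
--         j -= 7
--     return s[:j]
-- ===== Notes on version B (the rewrite author's own statement) =====
-- stated objective: alternative
-- what changed: A's two value-fixpoint while-loops (comparing the string against its previous copy and re-slicing each round) are replaced by index arithmetic: advance a start offset past leading '_inner.' markers and retreat an end offset past trailing '._inner' markers, slicing only once per end; the middle replace is kept verbatim.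
import Mathlib
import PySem

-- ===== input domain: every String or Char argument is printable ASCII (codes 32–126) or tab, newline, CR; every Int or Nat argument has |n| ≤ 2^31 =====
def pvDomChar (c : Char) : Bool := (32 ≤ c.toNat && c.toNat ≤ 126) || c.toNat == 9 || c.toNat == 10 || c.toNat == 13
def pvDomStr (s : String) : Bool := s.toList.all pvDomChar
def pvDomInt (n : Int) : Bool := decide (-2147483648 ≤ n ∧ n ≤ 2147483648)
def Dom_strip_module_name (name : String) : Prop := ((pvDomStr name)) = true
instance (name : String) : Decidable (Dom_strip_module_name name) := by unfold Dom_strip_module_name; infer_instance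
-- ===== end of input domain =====

-- B replaces A's two copy-and-compare fixpoint while-loops by start/end index arithmetic (alternative decomposition).

-- ===== PORT A =====
-- str.removeprefix("_inner."): exact — drop the 7 chars iff the string starts with the prefix
def pvRp (s : List Char) : List Char :=
  if PySem.Chars.startswith s "_inner.".toList then s.drop 7 else s

-- str.removesuffix("._inner"): exact — keep len-7 chars iff the string ends with the suffix
def pvRs (s : List Char) : List Char :=
  if PySem.Chars.endswith s "._inner".toList then s.take (s.length - 7) else s

-- A's first while-loop, state (stripped, stripped_before); fuel is only a totality guard
def pvStripPrefLoop : Nat → List Char → List Char → List Char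
  | 0, stripped, _ => stripped
  | fuel+1, stripped, before =>
      if stripped ≠ before then pvStripPrefLoop fuel (pvRp stripped) stripped else stripped

-- A's second while-loop, same shape; fuel is only a totality guard
def pvStripSufLoop : Nat → List Char → List Char → List Char
  | 0, stripped, _ => stripped
  | fuel+1, stripped, before =>
      if stripped ≠ before then pvStripSufLoop fuel (pvRs stripped) stripped else stripped

def strip_module_name (name : String) : String :=
  let cs := name.toList
  let s1 := pvRp cs
  let s2 := pvStripPrefLoop (cs.length + 1) s1 cs
  let s3 := PySem.Chars.replace s2 "._inner.".toList ".".toList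
  let s4 := pvRs s3
  let s5 := pvStripSufLoop (s3.length + 1) s4 s3
  String.ofList s5

-- ===== PORT B =====
-- name.startswith("_inner.", i) for 0 ≤ i: exact as startswith on (drop i)
def pvAltPref (s : List Char) (i : Nat) : Nat :=
  if PySem.Chars.startswith (s.drop i) "_inner.".toList then pvAltPref s (i + 7) else i
termination_by s.length - i
decreasing_by
  rename_i h
  have := (PySem.Chars.startswith_iff _ _).mp h
  have := this.length_le
  simp at this
  omega

-- s.endswith("._inner", 0, j): exact as endswith on (take j)
def pvAltSuf (s : List Char) (j : Nat) : Nat :=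
  if PySem.Chars.endswith (s.take j) "._inner".toList then pvAltSuf s (j - 7) else j
termination_by j
decreasing_by
  rename_i h
  have := (PySem.Chars.endswith_iff _ _).mp h
  have := this.length_le
  simp at this
  omega

def strip_module_name_alt (name : String) : String :=
  let cs := name.toList
  let i := pvAltPref cs 0
  let s := PySem.Chars.replace (cs.drop i) "._inner.".toList ".".toList
  let j := pvAltSuf s s.length
  String.ofList (s.take j)

-- ===== PRECONDITION & SPEC =====
def Spec_strip_module_name (name : String) (out : String) : Prop := out = strip_module_name_alt name
instance (name : String) (out : String) : Decidable (Spec_strip_module_name name out) := by unfold Spec_strip_module_name; infer_instance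

-- ===== CLAIM (what is proved, stated in full; the proofs are below) =====
def Claim_equal_strip_module_name : Prop := ∀ (name : String), Dom_strip_module_name name → Spec_strip_module_name name (strip_module_name name)

-- ===== LEMMAS AND PROOFS =====

-- proof-side canonical forms of the two stripping passes
def pvDropAll (s : List Char) : List Char :=
  if PySem.Chars.startswith s "_inner.".toList then pvDropAll (s.drop 7) else s
termination_by s.length
decreasing_by
  rename_i h
  have h7 : ("_inner.".toList).length = 7 := by decide
  have := ((PySem.Chars.startswith_iff _ _).mp h).length_le
  rw [h7] at this
  simp only [List.length_drop]
  omega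

def pvTakeAll (s : List Char) : List Char :=
  if PySem.Chars.endswith s "._inner".toList then pvTakeAll (s.take (s.length - 7)) else s
termination_by s.length
decreasing_by
  rename_i h
  have h7 : ("._inner".toList).length = 7 := by decide
  have := ((PySem.Chars.endswith_iff _ _).mp h).length_le
  rw [h7] at this
  simp only [List.length_take]
  omega

theorem pvPrefA (cs : List Char) : ∀ fuel, cs.length ≤ fuel →
    pvStripPrefLoop fuel (pvRp cs) cs = pvDropAll cs := by
  induction cs using (measure List.length).wf.induction with
  | _ cs ih =>
    intro fuel hf
    by_cases h : PySem.Chars.startswith cs "_inner.".toList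
    · have hp : ("_inner.".toList).length = 7 := by decide
      have hlen := ((PySem.Chars.startswith_iff _ _).mp h).length_le
      rw [hp] at hlen
      obtain ⟨k, rfl⟩ : ∃ k, fuel = k + 1 := ⟨fuel - 1, by omega⟩
      have hne : cs.drop 7 ≠ cs := by
        intro he
        have := congrArg List.length he
        simp only [List.length_drop] at this
        omega
      rw [pvRp, if_pos h]
      simp only [pvStripPrefLoop, if_pos hne]
      rw [ih (cs.drop 7) (by simp only [measure, invImage, InvImage, Nat.lt_wfRel, WellFoundedRelation.rel, List.length_drop, List.length_take]; omega) k (by simp only [List.length_drop]; omega)]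
      conv_rhs => rw [pvDropAll.eq_def]
      rw [if_pos h]
    · have hr : pvRp cs = cs := by rw [pvRp, if_neg h]
      rw [hr]
      conv_rhs => rw [pvDropAll.eq_def]
      rw [if_neg h]
      cases fuel with
      | zero => rfl
      | succ k => simp [pvStripPrefLoop]

theorem pvSufA (s : List Char) : ∀ fuel, s.length ≤ fuel →
    pvStripSufLoop fuel (pvRs s) s = pvTakeAll s := by
  induction s using (measure List.length).wf.induction with
  | _ s ih =>
    intro fuel hf
    by_cases h : PySem.Chars.endswith s "._inner".toList
    · have hp : ("._inner".toList).length = 7 := by decide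
      have hlen := ((PySem.Chars.endswith_iff _ _).mp h).length_le
      rw [hp] at hlen
      obtain ⟨k, rfl⟩ : ∃ k, fuel = k + 1 := ⟨fuel - 1, by omega⟩
      have hne : s.take (s.length - 7) ≠ s := by
        intro he
        have := congrArg List.length he
        simp only [List.length_take] at this
        omega
      rw [pvRs, if_pos h]
      simp only [pvStripSufLoop, if_pos hne]
      rw [ih (s.take (s.length - 7)) (by simp only [measure, invImage, InvImage, Nat.lt_wfRel, WellFoundedRelation.rel, List.length_drop, List.length_take]; omega) k (by simp only [List.length_take]; omega)]
      conv_rhs => rw [pvTakeAll.eq_def]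
      rw [if_pos h]
    · have hr : pvRs s = s := by rw [pvRs, if_neg h]
      rw [hr]
      conv_rhs => rw [pvTakeAll.eq_def]
      rw [if_neg h]
      cases fuel with
      | zero => rfl
      | succ k => simp [pvStripSufLoop]

theorem pvPrefB (cs : List Char) : ∀ i, cs.drop (pvAltPref cs i) = pvDropAll (cs.drop i) := by
  intro i
  induction i using (measure (fun i => cs.length - i)).wf.induction with
  | _ i ih =>
    by_cases h : PySem.Chars.startswith (cs.drop i) "_inner.".toList
    · have hp : ("_inner.".toList).length = 7 := by decide
      have hlen := ((PySem.Chars.startswith_iff _ _).mp h).length_le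
      rw [hp] at hlen
      simp only [List.length_drop] at hlen
      rw [pvAltPref.eq_def, if_pos h]
      conv_rhs => rw [pvDropAll.eq_def]
      rw [if_pos h]
      rw [ih (i + 7) (by simp only [measure, invImage, InvImage, Nat.lt_wfRel, WellFoundedRelation.rel, List.length_drop, List.length_take]; omega)]
      rw [List.drop_drop]
    · rw [pvAltPref.eq_def, if_neg h]
      conv_rhs => rw [pvDropAll.eq_def]
      rw [if_neg h]

theorem pvSufB (s : List Char) : ∀ j, j ≤ s.length → s.take (pvAltSuf s j) = pvTakeAll (s.take j) := by
  intro j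
  induction j using Nat.strong_induction_on with
  | _ j ih =>
    intro hj
    by_cases h : PySem.Chars.endswith (s.take j) "._inner".toList
    · have hp : ("._inner".toList).length = 7 := by decide
      have hlen := ((PySem.Chars.endswith_iff _ _).mp h).length_le
      rw [hp] at hlen
      simp only [List.length_take] at hlen
      have h7 : 7 ≤ j := by omega
      rw [pvAltSuf.eq_def, if_pos h]
      conv_rhs => rw [pvTakeAll.eq_def]
      rw [if_pos h]
      have hlt : (s.take j).length = j := by simp only [List.length_take]; omega
      rw [hlt, List.take_take]
      have hmin : min (j - 7) j = j - 7 := by omega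
      rw [hmin, ih (j - 7) (by omega) (by omega)]
    · rw [pvAltSuf.eq_def, if_neg h]
      conv_rhs => rw [pvTakeAll.eq_def]
      rw [if_neg h]

-- ===== VERDICT (by name: the statement is the Claim_ definition above) =====
theorem strip_module_name_spec : Claim_equal_strip_module_name := by
  intro name _
  unfold Spec_strip_module_name
  simp only [strip_module_name, strip_module_name_alt]
  rw [pvPrefA name.toList (name.toList.length + 1) (by omega)]
  rw [pvPrefB name.toList 0]
  rw [List.drop_zero]
  rw [pvSufA _ _ (by omega)]
  rw [pvSufB _ _ (le_refl _)]
  rw [List.take_length]
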